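-- pv_equiv track=rewrite | github.com/Pac72/advent-of-fpga | 2025/python/part1.py | extract_joltage
-- ===== SOURCE A (Python) =====
-- def extract_joltage(line: str):
--     last_but_one = len(line) - 1
--     max1 = None
--     max2 = None
--     for idx, ch in enumerate(line):
--         if idx < last_but_one:
--             if not max1 or ch > max1:
--                 max1 = ch
--                 max2 = None
--             elif not max2 or ch > max2:
--                 max2 = ch
--         else:
--             if not max2 or ch > max2:
--                 max2 = ch
--     assert(max1 and max2)
--     return (ord(max1) - ord('0')) * 10 + (ord(max2) - ord('0'))
-- ===== SOURCE B (Python) =====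
-- def extract_joltage(line: str):
--     assert len(line) >= 2
--     max1 = max(line[:-1])
--     p = line.index(max1)
--     max2 = max(line[p + 1:])
--     return (ord(max1) - 48) * 10 + (ord(max2) - 48)
-- ===== Notes on version B (the rewrite author's own statement) =====
-- stated objective: simpler
-- what changed: A's single interleaved pass with reset-on-new-max state is replaced by three phases: max of line[:-1] via builtin max, its first position via .index, then max of the suffix after it; Pre_ excludes strings of length < 2, on which both raise AssertionError.
import Mathlib
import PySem

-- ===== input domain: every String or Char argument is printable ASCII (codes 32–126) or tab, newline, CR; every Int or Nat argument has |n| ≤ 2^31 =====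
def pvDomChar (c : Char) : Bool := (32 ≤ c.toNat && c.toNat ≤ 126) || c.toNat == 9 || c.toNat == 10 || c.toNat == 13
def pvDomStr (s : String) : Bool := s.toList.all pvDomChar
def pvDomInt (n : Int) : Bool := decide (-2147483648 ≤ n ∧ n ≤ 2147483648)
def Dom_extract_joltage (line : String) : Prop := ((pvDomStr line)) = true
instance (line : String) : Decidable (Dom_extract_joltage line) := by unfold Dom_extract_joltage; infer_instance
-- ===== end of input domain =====

-- B replaces A's single interleaved reset-pass by three phases (max of the prefix, its
-- first position, max of the suffix after it); objective: simpler.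

-- ===== PORT A =====
-- loop body of A, as a helper: p = (idx, ch), m = (max1, max2); 'not max1' on a char is 'max1 is None'
def aStep (lastButOne : Int) (m : Option Char × Option Char) (p : Int × Char) :
    Option Char × Option Char :=
  if p.1 < lastButOne then
    if m.1.elim true (fun m1 => m1 < p.2) then (some p.2, none)
    else if m.2.elim true (fun m2 => m2 < p.2) then (m.1, some p.2)
    else m
  else
    if m.2.elim true (fun m2 => m2 < p.2) then (m.1, some p.2) else m

def extract_joltage (line : String) : Int :=
  let cs := line.toList
  let lastButOne : Int := (cs.length : Int) - 1
  match (PySem.List.enumerate cs 0).foldl (aStep lastButOne) (none, none) with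
  | (some m1, some m2) => ((m1.toNat : Int) - 48) * 10 + ((m2.toNat : Int) - 48)
  | _ => 0   -- assert(max1 and max2) fails: AssertionError, excluded by Pre_

-- ===== PORT B =====
def extract_joltage_alt (line : String) : Int :=
  let cs := line.toList
  if (cs.length : Int) < 2 then 0   -- assert len(line) >= 2 fails: AssertionError, excluded by Pre_
  else
    match PySem.List.max? (PySem.List.slice cs none (some (-1))) (fun c => c) with
    | none => 0      -- unreachable under the assert
    | some max1 =>
      match PySem.List.index? cs max1 with
      | none => 0    -- unreachable: max1 occurs in cs
      | some p =>
        match PySem.List.max? (PySem.List.slice cs (some ((p : Int) + 1)) none) (fun c => c) with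
        | none => 0  -- unreachable: the suffix contains the last character
        | some max2 => ((max1.toNat : Int) - 48) * 10 + ((max2.toNat : Int) - 48)

-- ===== PRECONDITION & SPEC =====
-- on strings of length 0 or 1 both A and B raise AssertionError; Pre_ excludes exactly those
def Pre_extract_joltage (line : String) : Prop := 2 ≤ line.toList.length
instance (line : String) : Decidable (Pre_extract_joltage line) := by
  unfold Pre_extract_joltage; infer_instance

def pvWitness_extract_joltage : String := "23"

def Spec_extract_joltage (line : String) (out : Int) : Prop := out = extract_joltage_alt line
instance (line : String) (out : Int) : Decidable (Spec_extract_joltage line out) := by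
  unfold Spec_extract_joltage; infer_instance

-- ===== CLAIM (what is proved, stated in full; the proofs are below) =====
def Claim_equal_extract_joltage : Prop :=
  ∀ (line : String), Dom_extract_joltage line → Pre_extract_joltage line →
    Spec_extract_joltage line (extract_joltage line)

-- ===== LEMMAS AND PROOFS =====

-- A's two loop branches, as plain steps on the state (max1, max2)
def stepPre (m : Option Char × Option Char) (ch : Char) : Option Char × Option Char :=
  if m.1.elim true (fun m1 => m1 < ch) then (some ch, none)
  else if m.2.elim true (fun m2 => m2 < ch) then (m.1, some ch)
  else m

def stepLast (m : Option Char × Option Char) (ch : Char) : Option Char × Option Char :=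
  if m.2.elim true (fun m2 => m2 < ch) then (m.1, some ch) else m

-- Python's running max of an optional accumulator and one more element
def omaxC (o : Option Char) (y : Char) : Char :=
  match o with
  | none => y
  | some m => if m < y then y else m

lemma if_lt_eq_max (M y : Char) : (if M < y then y else M) = max M y := by
  rcases lt_or_ge M y with h | h
  · rw [if_pos h, max_eq_right h.le]
  · rw [if_neg (not_lt_of_ge h), max_eq_left h]

lemma max?_append_singleton (t : List Char) (y : Char) :
    PySem.List.max? (t ++ [y]) (fun c => c) = some (omaxC (PySem.List.max? t (fun c => c)) y) := by
  cases t with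
  | nil => simp [PySem.List.max?, omaxC]
  | cons a t' =>
      rw [List.cons_append, PySem.List.max?_id_cons, PySem.List.max?_id_cons,
        List.foldl_append]
      simp [List.foldl, omaxC, if_lt_eq_max]

lemma stepPre_eq (m1 : Char) (M2 : Option Char) (x : Char) :
    stepPre (some m1, M2) x =
      if m1 < x then (some x, none) else (some m1, some (omaxC M2 x)) := by
  cases M2 with
  | none => simp [stepPre, omaxC]
  | some m2 =>
      simp only [stepPre, omaxC, Option.elim_some]
      by_cases h1 : m1 < x <;> by_cases h2 : m2 < x <;> simp [h1, h2]

lemma stepLast_eq (o : Option Char) (M2 : Option Char) (x : Char) :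
    stepLast (o, M2) x = (o, some (omaxC M2 x)) := by
  cases M2 with
  | none => simp [stepLast, omaxC]
  | some m2 =>
      simp only [stepLast, omaxC, Option.elim_some]
      by_cases h2 : m2 < x <;> simp [h2]

-- invariant of A's prefix loop: max1 is the first maximum of the prefix processed so far,
-- max2 is the max of what follows its first occurrence
lemma foldl_stepPre_inv (l : List Char) (hl : l ≠ []) :
    ∃ m1 p, PySem.List.max? l (fun c => c) = some m1 ∧
      PySem.List.index? l m1 = some p ∧ p < l.length ∧
      l.foldl stepPre (none, none) = (some m1, PySem.List.max? (l.drop (p + 1)) (fun c => c)) := by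
  induction l using List.reverseRecOn with
  | nil => exact absurd rfl hl
  | append_singleton l' x ih =>
      cases hl' : l' with
      | nil =>
          subst hl'
          refine ⟨x, 0, ?_, ?_, by simp, ?_⟩
          · simp [PySem.List.max?_id_cons]
          · simp
          · simp [stepPre, PySem.List.max?]
      | cons a t =>
          rw [← hl']
          have hl'ne : l' ≠ [] := by simp [hl']
          obtain ⟨m1, p, hmax, hidx, hp, hfold⟩ := ih hl'ne
          have hfoldx : (l' ++ [x]).foldl stepPre (none, none) =
              stepPre (l'.foldl stepPre (none, none)) x := by
            rw [List.foldl_append]; rfl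
          by_cases hx : m1 < x
          · -- x is a new strict maximum: max1 resets, max2 cleared
            have hnotmem : x ∉ l' := by
              intro hmem
              have := PySem.List.max?_isMax hmax x hmem
              exact absurd (lt_of_lt_of_le hx this) (lt_irrefl _)
            refine ⟨x, l'.length, ?_, ?_, by simp, ?_⟩
            · rw [max?_append_singleton, hmax]; simp [omaxC, hx]
            · exact PySem.List.index?_append_singleton_self l' x hnotmem
            · rw [hfoldx, hfold, stepPre_eq, if_pos hx]
              have : (l' ++ [x]).drop (l'.length + 1) = [] :=
                List.drop_eq_nil_of_le (by simp)
              rw [this]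
              simp [PySem.List.max?]
          · -- x ≤ max1: max1 and its position unchanged, x joins max2's pool
            have hm1mem : m1 ∈ l' := PySem.List.max?_mem hmax
            refine ⟨m1, p, ?_, ?_, by simp [Nat.lt_succ_of_lt hp], ?_⟩
            · rw [max?_append_singleton, hmax]; simp [omaxC, hx]
            · rw [PySem.List.index?_append_of_mem _ hm1mem, hidx]
            · rw [hfoldx, hfold, stepPre_eq, if_neg hx]
              have hdrop : (l' ++ [x]).drop (p + 1) = l'.drop (p + 1) ++ [x] :=
                List.drop_append_of_le_length (by omega)
              rw [hdrop, max?_append_singleton]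

-- the prefix of A's enumerate-loop (all indices below lastButOne) is a plain stepPre fold
lemma foldA_pre (lb : Int) (l : List Char) (s : Int)
    (h : s + l.length ≤ lb) (m : Option Char × Option Char) :
    (PySem.List.enumerate l s).foldl (aStep lb) m = l.foldl stepPre m := by
  induction l generalizing s m with
  | nil => simp [PySem.List.enumerate_nil]
  | cons a t ih =>
      rw [PySem.List.enumerate_cons, List.foldl_cons, List.foldl_cons]
      have hs : s < lb := by
        have : (0 : Int) ≤ t.length := Int.natCast_nonneg _
        simp only [List.length_cons] at h
        push_cast at h
        omega
      have : aStep lb m (s, a) = stepPre m a := by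
        simp [aStep, stepPre, if_pos hs]
      rw [this]
      exact ih (s + 1) (by simp only [List.length_cons] at h; push_cast at h ⊢; omega) _

-- ===== VERDICT (by name: the statement is the Claim_ definition above) =====
theorem extract_joltage_spec : Claim_equal_extract_joltage := by
  intro line _ hpre
  unfold Pre_extract_joltage at hpre
  unfold Spec_extract_joltage extract_joltage extract_joltage_alt
  set cs := line.toList with hcs
  have hcsne : cs ≠ [] := by intro h; rw [h] at hpre; simp at hpre
  set l := cs.dropLast with hl
  set y := cs.getLast hcsne with hy
  have hsplit : cs = l ++ [y] := (List.dropLast_append_getLast hcsne).symm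
  have hlne : l ≠ [] := by
    intro h
    have := congrArg List.length hsplit
    rw [h] at this; simp at this
    omega
  obtain ⟨m1, p, hmax, hidx, hp, hfold⟩ := foldl_stepPre_inv l hlne
  have hlen : cs.length = l.length + 1 := by rw [hsplit]; simp
  -- evaluate A
  have henum : PySem.List.enumerate cs 0 =
      PySem.List.enumerate l 0 ++ [((l.length : Int), y)] := by
    rw [hsplit, PySem.List.enumerate_append, PySem.List.enumerate_cons,
      PySem.List.enumerate_nil]
    norm_num
  have hA : (PySem.List.enumerate cs 0).foldl (aStep ((cs.length : Int) - 1)) (none, none) =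
      (some m1, some (omaxC (PySem.List.max? (l.drop (p + 1)) (fun c => c)) y)) := by
    rw [henum, List.foldl_append]
    rw [foldA_pre ((cs.length : Int) - 1) l 0 (by rw [hlen]; push_cast; omega)]
    rw [hfold, List.foldl_cons, List.foldl_nil]
    have hlast : aStep ((cs.length : Int) - 1)
        (some m1, PySem.List.max? (l.drop (p + 1)) (fun c => c)) ((l.length : Int), y) =
        stepLast (some m1, PySem.List.max? (l.drop (p + 1)) (fun c => c)) y := by
      have hnot : ¬ ((l.length : Int) < (cs.length : Int) - 1) := by
        rw [hlen]; push_cast; omega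
      simp [aStep, stepLast, if_neg hnot]
    rw [hlast, stepLast_eq]
  -- evaluate B
  have hnotlt : ¬ ((cs.length : Int) < 2) := by omega
  have hslice1 : PySem.List.slice cs none (some (-1)) = l := PySem.List.slice_to_neg_one cs
  have hidxcs : PySem.List.index? cs m1 = some p := by
    rw [hsplit, PySem.List.index?_append_of_mem _ (PySem.List.max?_mem hmax), hidx]
  have hslice2 : PySem.List.slice cs (some ((p : Int) + 1)) none = l.drop (p + 1) ++ [y] := by
    have : ((p : Int) + 1) = ((p + 1 : Nat) : Int) := by push_cast; ring
    rw [this, PySem.List.slice_from_natCast, hsplit,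
      List.drop_append_of_le_length (by omega)]
  simp only [hA, hnotlt, hslice1, hmax, hidxcs, hslice2, max?_append_singleton]
  simp
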